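-- pv_equiv track=rewrite | github.com/Crawlerop/cdmatools | x9500_decoder_lib.py | compute_1bpp_size
-- ===== SOURCE A (Python) =====
-- def compute_1bpp_size(w,h):
--     size = 1
--     x = 0
--     y = 0
--     bits_left = 7
--
--     while True:
--         x += 1
--         if x >= w:
--             y += 1
--             x = 0
--             if y >= h:
--                 return size, bits_left
--
--         if bits_left <= 0:
--             size += 1
--             bits_left = 8
--
--         bits_left -= 1
-- ===== SOURCE B (Python) =====
-- def compute_1bpp_size(w, h):
--     # The loop runs exactly max(w,1)*max(h,1) iterations; the last returns
--     # before consuming its bit, so n-1 bits are consumed starting from a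
--     # fresh byte of 8 bits.
--     n = max(w, 1) * max(h, 1)
--     return 1 + (n - 1) // 8, 7 - (n - 1) % 8
-- ===== Notes on version B (the rewrite author's own statement) =====
-- stated objective: faster
-- what changed: Replaces the per-pixel while-loop with a closed form: the loop runs exactly n = max(w,1)*max(h,1) iterations, so size = 1 + (n-1)//8 and bits_left = 7 - (n-1)%8.
import Mathlib
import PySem

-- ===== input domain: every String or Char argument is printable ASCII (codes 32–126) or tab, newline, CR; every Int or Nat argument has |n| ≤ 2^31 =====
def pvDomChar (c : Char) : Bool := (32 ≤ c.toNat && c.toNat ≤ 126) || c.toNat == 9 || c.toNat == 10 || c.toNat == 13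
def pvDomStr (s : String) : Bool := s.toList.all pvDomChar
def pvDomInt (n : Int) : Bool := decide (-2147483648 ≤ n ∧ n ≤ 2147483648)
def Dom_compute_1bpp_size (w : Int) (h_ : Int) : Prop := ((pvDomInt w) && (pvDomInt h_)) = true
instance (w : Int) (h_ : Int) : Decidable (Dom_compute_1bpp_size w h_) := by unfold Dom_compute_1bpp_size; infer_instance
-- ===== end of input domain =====

-- B replaces A's per-pixel loop by the closed form over n = max(w,1)*max(h,1)
-- iterations (objective: faster, O(1) instead of O(w*h)).

-- ===== PORT A =====
-- A's 'while True' loop; the fuel (max w 1 * max h_ 1).toNat is exactly the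
-- number of iterations the Python loop performs before returning (proved below),
-- so the 0-fuel branch is never reached.
def pvLoopA (w : Int) (h_ : Int) : Int → Int → Int → Int → Nat → List Int
  | _, _, _, _, 0 => []
  | x, y, size, bits, fuel+1 =>
    let x1 := x + 1
    if x1 ≥ w then
      let y1 := y + 1
      -- x becomes 0
      if y1 ≥ h_ then [size, bits]
      else
        if bits ≤ 0 then pvLoopA w h_ 0 y1 (size + 1) (8 - 1) fuel
        else pvLoopA w h_ 0 y1 size (bits - 1) fuel
    else
      if bits ≤ 0 then pvLoopA w h_ x1 y (size + 1) (8 - 1) fuel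
      else pvLoopA w h_ x1 y size (bits - 1) fuel

def compute_1bpp_size (w : Int) (h_ : Int) : List Int :=
  pvLoopA w h_ 0 0 1 7 (max w 1 * max h_ 1).toNat

-- ===== PORT B =====
def compute_1bpp_size_alt (w : Int) (h_ : Int) : List Int :=
  let n := max w 1 * max h_ 1
  [1 + PySem.Int.floordiv (n - 1) 8, 7 - PySem.Int.mod (n - 1) 8]

-- ===== PRECONDITION & SPEC =====
def Spec_compute_1bpp_size (w : Int) (h_ : Int) (out : List Int) : Prop := out = compute_1bpp_size_alt w h_
instance (w : Int) (h_ : Int) (out : List Int) : Decidable (Spec_compute_1bpp_size w h_ out) := by unfold Spec_compute_1bpp_size; infer_instance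

-- ===== CLAIM (what is proved, stated in full; the proofs are below) =====
def Claim_equal_compute_1bpp_size : Prop := ∀ (w : Int) (h_ : Int), Dom_compute_1bpp_size w h_ → Spec_compute_1bpp_size w h_ (compute_1bpp_size w h_)

-- ===== LEMMAS AND PROOFS =====

-- Loop invariant: after c iterations (c = y*W + x pixels already consumed, W = max w 1),
-- the loop state is x, y, size = 1 + c/8, bits = 7 - c%8, and with enough fuel the loop
-- returns the values it holds at entry of iteration number W*H - 1.
theorem pvLoopA_inv (w h_ : Int) : ∀ (fuel : Nat) (x y c : Int),
    0 ≤ x → x < max w 1 → 0 ≤ y → y < max h_ 1 → c = y * max w 1 + x →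
    max w 1 * max h_ 1 - c ≤ (fuel : Int) →
    pvLoopA w h_ x y (1 + c / 8) (7 - c % 8) fuel =
      [1 + (max w 1 * max h_ 1 - 1) / 8, 7 - (max w 1 * max h_ 1 - 1) % 8] := by
  intro fuel
  induction fuel with
  | zero =>
    intro x y c hx0 hxW hy0 hyH hc hfuel
    exfalso
    have hW : (1:Int) ≤ max w 1 := le_max_right _ _
    have hyW : y * max w 1 ≤ (max h_ 1 - 1) * max w 1 :=
      mul_le_mul_of_nonneg_right (by omega) (by omega)
    have hexp : (max h_ 1 - 1) * max w 1 = max w 1 * max h_ 1 - max w 1 := by ring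
    simp only [Nat.cast_zero] at hfuel
    omega
  | succ fuel ih =>
    intro x y c hx0 hxW hy0 hyH hc hfuel
    have hW : (1:Int) ≤ max w 1 := le_max_right _ _
    have hH : (1:Int) ≤ max h_ 1 := le_max_right _ _
    have hc0 : 0 ≤ c := by
      have : 0 ≤ y * max w 1 := mul_nonneg hy0 (by omega)
      omega
    simp only [pvLoopA]
    by_cases hx : x + 1 ≥ w
    · -- row wraps: x = W - 1
      have hxeq : x = max w 1 - 1 := by
        by_cases hw : w ≤ 1
        · have : max w 1 = 1 := max_eq_right hw
          omega
        · have : max w 1 = w := max_eq_left (by omega)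
          omega
      by_cases hy : y + 1 ≥ h_
      · -- last pixel: return
        have hyeq : y = max h_ 1 - 1 := by
          by_cases hh : h_ ≤ 1
          · have : max h_ 1 = 1 := max_eq_right hh
            omega
          · have : max h_ 1 = h_ := max_eq_left (by omega)
            omega
        have hcval : c = max w 1 * max h_ 1 - 1 := by
          rw [hc, hxeq, hyeq]; ring
        rw [if_pos hx, if_pos hy, hcval]
      · -- next row
        have hy1H : y + 1 < max h_ 1 := lt_max_iff.mpr (Or.inl (by omega))
        have hc1 : c + 1 = (y + 1) * max w 1 + 0 := by rw [hc, hxeq]; ring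
        have hfuel' : max w 1 * max h_ 1 - (c + 1) ≤ (fuel : Int) := by
          push_cast at hfuel ⊢; omega
        rw [if_pos hx, if_neg hy]
        by_cases hb : 7 - c % 8 ≤ 0
        · rw [if_pos hb,
            show 1 + c / 8 + 1 = 1 + (c + 1) / 8 by omega,
            show (8:Int) - 1 = 7 - (c + 1) % 8 by omega]
          exact ih 0 (y + 1) (c + 1) le_rfl (by omega) (by omega) hy1H hc1 hfuel'
        · rw [if_neg hb,
            show 7 - c % 8 - 1 = 7 - (c + 1) % 8 by omega,
            show 1 + c / 8 = 1 + (c + 1) / 8 by omega]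
          exact ih 0 (y + 1) (c + 1) le_rfl (by omega) (by omega) hy1H hc1 hfuel'
    · -- same row
      have hw2 : 2 ≤ w := by omega
      have hWw : max w 1 = w := max_eq_left (by omega)
      have hx1W : x + 1 < max w 1 := by omega
      have hc1 : c + 1 = y * max w 1 + (x + 1) := by omega
      have hfuel' : max w 1 * max h_ 1 - (c + 1) ≤ (fuel : Int) := by
        push_cast at hfuel ⊢; omega
      rw [if_neg hx]
      by_cases hb : 7 - c % 8 ≤ 0
      · rw [if_pos hb,
          show 1 + c / 8 + 1 = 1 + (c + 1) / 8 by omega,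
          show (8:Int) - 1 = 7 - (c + 1) % 8 by omega]
        exact ih (x + 1) y (c + 1) (by omega) hx1W hy0 hyH hc1 hfuel'
      · rw [if_neg hb,
          show 7 - c % 8 - 1 = 7 - (c + 1) % 8 by omega,
          show 1 + c / 8 = 1 + (c + 1) / 8 by omega]
        exact ih (x + 1) y (c + 1) (by omega) hx1W hy0 hyH hc1 hfuel'

-- ===== VERDICT (by name: the statement is the Claim_ definition above) =====
theorem compute_1bpp_size_spec : Claim_equal_compute_1bpp_size := by
  intro w h_ _
  unfold Spec_compute_1bpp_size compute_1bpp_size compute_1bpp_size_alt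
  have hW : (1:Int) ≤ max w 1 := le_max_right _ _
  have hH : (1:Int) ≤ max h_ 1 := le_max_right _ _
  have hn : (1:Int) ≤ max w 1 * max h_ 1 := by nlinarith
  have hfuel : max w 1 * max h_ 1 - 0 ≤ (((max w 1 * max h_ 1).toNat : Nat) : Int) := by
    rw [Int.toNat_of_nonneg (by omega)]; omega
  have := pvLoopA_inv w h_ (max w 1 * max h_ 1).toNat 0 0 0
    le_rfl (by omega) le_rfl (by omega) (by ring) hfuel
  simp only [show (0:Int) / 8 = 0 by norm_num, show (0:Int) % 8 = 0 by norm_num,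
    add_zero, sub_zero] at this
  rw [this]
  simp only [PySem.Int.floordiv_eq_ediv_of_pos (show (0:Int) < 8 by norm_num),
    PySem.Int.mod_eq_emod_of_pos (show (0:Int) < 8 by norm_num)]
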